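-- pv_equiv track=rewrite | github.com/HueyAmiNhvtim/tuber_comments_analysis | data_sanitization.py | words_combiner
-- ===== SOURCE A (Python) =====
-- from string import punctuation
--
-- def words_combiner(sentences: list):
--     """This and the freq dict are the only things I get from the analyzer. Even then, in this case, I have to use
--     extended punctuation unicode list to eliminate non-conventional punctuations."""
--     comment_string = " ".join(sentences)
--     formatted_string = ""
--     for i in comment_string:
--         if i not in punctuation:
--             formatted_string += i
--     formatted_string = formatted_string.lower()
--     list_o_words = formatted_string.split()
--     return list_o_words
-- ===== SOURCE B (Python) =====
-- from string import punctuation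
--
-- def words_combiner(sentences: list):
--     result = []
--     for token in " ".join(sentences).split():
--         cleaned = "".join(ch for ch in token if ch not in punctuation).lower()
--         if cleaned:
--             result.append(cleaned)
--     return result
-- ===== Notes on version B (the rewrite author's own statement) =====
-- stated objective: alternative
-- what changed: A filters punctuation out of the whole joined string character by character, lowercases the flat result and splits it once at the end; B splits the joined string into whitespace tokens first and cleans each token separately (inner filter-and-lower pass), discarding tokens that become empty.
import Mathlib
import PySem

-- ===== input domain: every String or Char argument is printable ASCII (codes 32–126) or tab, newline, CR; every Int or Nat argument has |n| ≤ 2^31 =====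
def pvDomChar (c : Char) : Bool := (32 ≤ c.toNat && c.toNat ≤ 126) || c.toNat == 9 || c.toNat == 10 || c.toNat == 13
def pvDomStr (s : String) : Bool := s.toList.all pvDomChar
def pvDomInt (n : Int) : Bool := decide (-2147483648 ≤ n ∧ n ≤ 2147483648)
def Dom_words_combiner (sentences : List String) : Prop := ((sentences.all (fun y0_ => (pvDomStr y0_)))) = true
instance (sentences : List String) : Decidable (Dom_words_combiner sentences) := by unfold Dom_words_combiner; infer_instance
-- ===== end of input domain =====

-- B splits the joined string into whitespace tokens first and cleans each token (filter punctuation, lowercase),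
-- dropping tokens that become empty; A filters the whole flat string and splits last. Same result, alternative decomposition.

-- string.punctuation
def punctChars : List Char := "!\"#$%&'()*+,-./:;<=>?@[\\]^_`{|}~".toList

-- ===== PORT A =====
def words_combiner (sentences : List String) : List String :=
  let commentString := PySem.Str.join " " sentences
  let formattedString := commentString.toList.foldl
    (fun acc c => if !PySem.Chars.isIn [c] punctChars then acc ++ [c] else acc) []
  let lowered := PySem.Chars.lower formattedString
  (PySem.Chars.split₀ lowered).map String.ofList

-- ===== PORT B =====
def words_combiner_alt (sentences : List String) : List String :=
  let tokens := PySem.Str.split₀ (PySem.Str.join " " sentences)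
  tokens.foldl (fun result tok =>
    let cleaned := PySem.Chars.lower (tok.toList.filter (fun ch => !PySem.Chars.isIn [ch] punctChars))
    if !cleaned.isEmpty then result ++ [String.ofList cleaned] else result) []

-- ===== PRECONDITION & SPEC =====
def Spec_words_combiner (sentences : List String) (out : List String) : Prop := out = words_combiner_alt sentences
instance (sentences : List String) (out : List String) : Decidable (Spec_words_combiner sentences out) := by unfold Spec_words_combiner; infer_instance

-- ===== CLAIM (what is proved, stated in full; the proofs are below) =====
def Claim_equal_words_combiner : Prop := ∀ (sentences : List String), Dom_words_combiner sentences → Spec_words_combiner sentences (words_combiner sentences)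

-- ===== LEMMAS AND PROOFS =====

-- the accumulator of split₀.go is a fully-built prefix of the result
theorem split_go_acc (s : List Char) (cur : List Char) (acc : List (List Char)) :
    PySem.Chars.split₀.go s cur acc = acc.reverse ++ PySem.Chars.split₀.go s cur [] := by
  induction s generalizing cur acc with
  | nil =>
    unfold PySem.Chars.split₀.go
    by_cases h : cur.isEmpty <;> simp [h]
  | cons c rest ih =>
    unfold PySem.Chars.split₀.go
    by_cases h : PySem.Chars.isspace c
    · by_cases h2 : cur.isEmpty
      · simp only [h, h2, if_true]
        exact ih [] acc
      · simp only [h, h2, if_true, Bool.false_eq_true, if_false]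
        rw [ih [] (cur.reverse :: acc), ih [] [cur.reverse]]
        simp
    · simp only [h, Bool.false_eq_true, if_false]
      exact ih (c :: cur) acc

-- splitting a char-filtered string = filtering each word, dropping empties (the filter keeps all whitespace)
theorem split_go_filter (p : Char → Bool) (hp : ∀ c, PySem.Chars.isspace c = true → p c = true)
    (s : List Char) (cur : List Char) :
    PySem.Chars.split₀.go (s.filter p) (cur.filter p) [] =
      ((PySem.Chars.split₀.go s cur []).map (·.filter p)).filter (fun w => !w.isEmpty) := by
  induction s generalizing cur with
  | nil =>
    unfold PySem.Chars.split₀.go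
    by_cases h : cur.isEmpty
    · have : cur = [] := List.isEmpty_iff.mp h
      simp [this]
    · by_cases h2 : (cur.filter p).isEmpty <;>
        simp [h, h2, List.filter_reverse, List.isEmpty_reverse]
  | cons c rest ih =>
    by_cases hs : PySem.Chars.isspace c
    · have hpc := hp c hs
      rw [show (c :: rest).filter p = c :: rest.filter p by simp [hpc]]
      conv_lhs => unfold PySem.Chars.split₀.go
      conv_rhs => unfold PySem.Chars.split₀.go
      by_cases h2 : cur.isEmpty
      · have : cur = [] := List.isEmpty_iff.mp h2
        simp only [this, List.filter_nil, List.isEmpty_nil, hs, if_true]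
        simpa using ih []
      · by_cases h3 : (cur.filter p).isEmpty <;>
          simp only [hs, if_true, h2, h3, if_false, if_true, Bool.false_eq_true] <;>
          rw [split_go_acc (rest.filter p), split_go_acc rest] <;>
          simp [List.filter_reverse, List.isEmpty_reverse, h3] <;>
          simpa using ih []
    · by_cases hpc : p c
      · rw [show (c :: rest).filter p = c :: rest.filter p by simp [hpc]]
        conv_lhs => unfold PySem.Chars.split₀.go
        conv_rhs => unfold PySem.Chars.split₀.go
        simp only [hs, Bool.false_eq_true, if_false]
        have := ih (c :: cur)
        rwa [show (c :: cur).filter p = c :: cur.filter p by simp [hpc]] at this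
      · rw [show (c :: rest).filter p = rest.filter p by simp [hpc]]
        conv_rhs => unfold PySem.Chars.split₀.go
        simp only [hs, Bool.false_eq_true, if_false]
        have := ih (c :: cur)
        rwa [show (c :: cur).filter p = cur.filter p by simp [hpc]] at this

-- splitting a char-mapped string = mapping each word (f preserves whitespace-ness)
theorem split_go_map (f : Char → Char) (hf : ∀ c, PySem.Chars.isspace (f c) = PySem.Chars.isspace c)
    (s : List Char) (cur : List Char) :
    PySem.Chars.split₀.go (s.map f) (cur.map f) [] =
      (PySem.Chars.split₀.go s cur []).map (·.map f) := by
  induction s generalizing cur with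
  | nil =>
    unfold PySem.Chars.split₀.go
    by_cases h : cur.isEmpty <;> simp [h, List.map_reverse]
  | cons c rest ih =>
    simp only [List.map_cons]
    conv_lhs => unfold PySem.Chars.split₀.go
    conv_rhs => unfold PySem.Chars.split₀.go
    by_cases hs : PySem.Chars.isspace c
    · by_cases h2 : cur.isEmpty
      · have : cur = [] := List.isEmpty_iff.mp h2
        simp only [this, List.map_nil, hf, hs, if_true, List.isEmpty_nil]
        simpa using ih []
      · simp only [hf, hs, if_true, h2, List.isEmpty_map, if_false, Bool.false_eq_true]
        rw [split_go_acc (rest.map f), split_go_acc rest]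
        simp only [List.map_append, List.map_reverse]
        simpa using ih []
    · simp only [hf, hs, Bool.false_eq_true, if_false]
      exact ih (c :: cur)

-- split₀-level corollaries
theorem split₀_map (f : Char → Char) (hf : ∀ c, PySem.Chars.isspace (f c) = PySem.Chars.isspace c)
    (s : List Char) :
    PySem.Chars.split₀ (s.map f) = (PySem.Chars.split₀ s).map (·.map f) := by
  unfold PySem.Chars.split₀
  simpa using split_go_map f hf s []

theorem split₀_filter (p : Char → Bool) (hp : ∀ c, PySem.Chars.isspace c = true → p c = true)
    (s : List Char) :
    PySem.Chars.split₀ (s.filter p) =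
      ((PySem.Chars.split₀ s).map (·.filter p)).filter (fun w => !w.isEmpty) := by
  unfold PySem.Chars.split₀
  simpa using split_go_filter p hp s []

-- lowercasing never changes whether a character is whitespace
theorem isspace_lowerChar (c : Char) :
    PySem.Chars.isspace (PySem.Chars.lowerChar c) = PySem.Chars.isspace c := by
  unfold PySem.Chars.lowerChar PySem.Chars.isupper
  split
  · next h =>
    simp only [Bool.and_eq_true, decide_eq_true_eq, Char.le_def] at h
    obtain ⟨h1, h2⟩ := h
    have h1' : 65 ≤ c.toNat := h1
    have h2' : c.toNat ≤ 90 := h2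
    have hv : Nat.isValidChar (c.toNat + 32) := Or.inl (by omega)
    have ht : (Char.ofNat (c.toNat + 32)).toNat = c.toNat + 32 := by
      rw [Char.ofNat, dif_pos hv]; rfl
    simp only [PySem.Chars.isspace, ht]
    rw [Bool.eq_iff_iff]
    simp only [Bool.or_eq_true, Bool.and_eq_true, decide_eq_true_eq]
    omega
  · rfl

-- whitespace characters are never punctuation
theorem space_not_punct (c : Char) (hs : PySem.Chars.isspace c = true) :
    (!PySem.Chars.isIn [c] punctChars) = true := by
  by_contra h
  have h' : PySem.Chars.isIn [c] punctChars = true := by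
    cases hiso : PySem.Chars.isIn [c] punctChars
    · simp [hiso] at h
    · rfl
  have hm : c ∈ punctChars := (List.singleton_infix_iff c punctChars).mp
    ((PySem.Chars.isIn_iff_infix [c] punctChars).mp h')
  have hl : punctChars = ['!', '"', '#', '$', '%', '&', '\'', '(', ')', '*', '+', ',', '-', '.', '/',
      ':', ';', '<', '=', '>', '?', '@', '[', '\\', ']', '^', '_', '`', '{', '|', '}', '~'] := by rfl
  rw [hl] at hm
  simp only [List.mem_cons, List.not_mem_nil, or_false] at hm
  have hns : PySem.Chars.isspace c = false := by
    rcases hm with rfl|rfl|rfl|rfl|rfl|rfl|rfl|rfl|rfl|rfl|rfl|rfl|rfl|rfl|rfl|rfl|rfl|rfl|rfl|rfl|rfl|rfl|rfl|rfl|rfl|rfl|rfl|rfl|rfl|rfl|rfl|rfl <;> rfl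
  rw [hns] at hs
  exact Bool.false_ne_true hs

-- B's per-token loop, characterised
theorem b_fold (g : List Char → List Char) (ws : List (List Char)) (acc : List String) :
    List.foldl
      (fun result tok =>
        if !(g tok.toList).isEmpty then result ++ [String.ofList (g tok.toList)] else result)
      acc (ws.map String.ofList) =
      acc ++ ((ws.map g).filter (fun w => !w.isEmpty)).map String.ofList := by
  induction ws generalizing acc with
  | nil => simp
  | cons w rest ih =>
    simp only [List.map_cons, List.foldl_cons, String.toList_ofList]
    rw [ih]
    by_cases h : (g w).isEmpty <;> simp [h]

-- mapping a char-map over words commutes with dropping empty words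
theorem filter_nonempty_map_comm (L : List (List Char)) (f : Char → Char) :
    (L.filter (fun w => !w.isEmpty)).map (·.map f) =
      (L.map (·.map f)).filter (fun w => !w.isEmpty) := by
  induction L with
  | nil => rfl
  | cons w rest ih =>
    by_cases h : w.isEmpty <;> simp [h, List.isEmpty_map, ih]

-- ===== VERDICT (by name: the statement is the Claim_ definition above) =====
theorem words_combiner_spec : Claim_equal_words_combiner := by
  intro sentences _
  unfold Spec_words_combiner words_combiner words_combiner_alt
  simp only [PySem.Str.split₀]
  generalize (PySem.Str.join " " sentences).toList = s
  have hfold := PySem.List.foldl_append_if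
    (fun c => !PySem.Chars.isIn [c] punctChars) id s []
  simp only [id_eq, List.map_id, List.nil_append] at hfold
  rw [hfold]
  rw [show PySem.Chars.lower (s.filter (fun c => !PySem.Chars.isIn [c] punctChars)) =
        (s.filter (fun c => !PySem.Chars.isIn [c] punctChars)).map PySem.Chars.lowerChar from rfl]
  rw [split₀_map PySem.Chars.lowerChar isspace_lowerChar,
      split₀_filter (fun c => !PySem.Chars.isIn [c] punctChars)
        (fun c hc => space_not_punct c hc) s]
  rw [b_fold (fun w => PySem.Chars.lower
        (w.filter (fun ch => !PySem.Chars.isIn [ch] punctChars)))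
      (PySem.Chars.split₀ s) []]
  rw [filter_nonempty_map_comm]
  simp [PySem.Chars.lower, List.map_map, Function.comp_def]
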